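-- pv_equiv track=rewrite | github.com/sloppymo/emotional-wellness-api | src/symbolic/adapters/canopy_adapter.py | _predict_next_archetype
-- ===== SOURCE A (Python) =====
-- from typing import Dict, List, Optional, Any
--
-- def _predict_next_archetype(sequence: List[str]) -> str:
--     """Predict the next likely archetype in a sequence."""
--     if not sequence:
--         return "self"  # Default prediction
--
--     # Simple Markov-chain-like prediction
--     transitions = {}
--     for i in range(len(sequence) - 1):
--         current = sequence[i]
--         next_arch = sequence[i + 1]
--         if current not in transitions:
--             transitions[current] = {}
--         transitions[current][next_arch] = transitions[current].get(next_arch, 0) + 1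
--
--     current_archetype = sequence[-1]
--     if current_archetype in transitions:
--         most_likely = max(
--             transitions[current_archetype].items(),
--             key=lambda x: x[1]
--         )[0]
--         return most_likely
--
--     return "self"  # Default if no pattern found
-- ===== SOURCE B (Python) =====
-- def _predict_next_archetype(sequence):
--     """Predict the next likely archetype in a sequence."""
--     if not sequence:
--         return "self"
--     last = sequence[-1]
--     counts = {}
--     for i in range(len(sequence) - 1):
--         if sequence[i] == last:
--             nxt = sequence[i + 1]
--             counts[nxt] = counts.get(nxt, 0) + 1
--     if counts:
--         return max(counts.items(), key=lambda x: x[1])[0]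
--     return "self"
-- ===== Notes on version B (the rewrite author's own statement) =====
-- stated objective: simpler
-- what changed: Instead of building the full per-archetype Markov transition table, B computes the final archetype first and makes one targeted pass counting only the successors of that archetype in a flat dict, then takes the max.
import Mathlib
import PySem

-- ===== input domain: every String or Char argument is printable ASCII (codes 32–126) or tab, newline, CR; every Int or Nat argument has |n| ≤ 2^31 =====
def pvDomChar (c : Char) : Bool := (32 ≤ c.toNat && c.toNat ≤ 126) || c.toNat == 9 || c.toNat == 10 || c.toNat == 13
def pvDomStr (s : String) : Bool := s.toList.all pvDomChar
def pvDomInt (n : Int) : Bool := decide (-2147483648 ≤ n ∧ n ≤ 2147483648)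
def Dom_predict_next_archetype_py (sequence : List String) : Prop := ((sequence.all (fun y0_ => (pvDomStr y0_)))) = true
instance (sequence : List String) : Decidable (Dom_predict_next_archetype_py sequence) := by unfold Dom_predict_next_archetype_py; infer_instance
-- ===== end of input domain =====

-- B changes the approach: A builds the whole per-archetype transition table; B counts only the
-- successors of the final archetype in one targeted pass (objective: simpler).

-- ===== PORT A =====
-- loop body of A's `for i in range(len(sequence) - 1)` (indices i, i+1 are always in range,
-- so pyGetD with a dummy default is exact here)
def pvAStep (sequence : List String) (transitions : PySem.Dict String (PySem.Dict String Int))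
    (i : Int) : PySem.Dict String (PySem.Dict String Int) :=
  let current := PySem.List.pyGetD sequence i ""
  let next_arch := PySem.List.pyGetD sequence (i + 1) ""
  let transitions :=
    if transitions.contains current then transitions
    else transitions.insert current PySem.Dict.empty
  let inner := transitions.getD current PySem.Dict.empty
  transitions.insert current (inner.insert next_arch (inner.getD next_arch 0 + 1))

def predict_next_archetype_py (sequence : List String) : String :=
  if sequence = [] then "self"
  else
    let transitions :=
      (PySem.List.pyRange 0 ((sequence.length : Int) - 1) 1).foldl (pvAStep sequence)
        PySem.Dict.empty
    let current_archetype := (PySem.List.pyGet? sequence (-1)).getD ""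
    if transitions.contains current_archetype then
      -- inner dicts are never empty, so Python's max never raises here
      match PySem.List.max? (transitions.getD current_archetype PySem.Dict.empty).items
          (fun x => x.2) with
      | some p => p.1
      | none => "self"
    else "self"

-- ===== PORT B =====
-- loop body of B's single counting pass
def pvBStep (sequence : List String) (last : String) (counts : PySem.Dict String Int)
    (i : Int) : PySem.Dict String Int :=
  if PySem.List.pyGetD sequence i "" = last then
    let nxt := PySem.List.pyGetD sequence (i + 1) ""
    counts.insert nxt (counts.getD nxt 0 + 1)
  else counts

def predict_next_archetype_py_alt (sequence : List String) : String :=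
  if sequence = [] then "self"
  else
    let last := (PySem.List.pyGet? sequence (-1)).getD ""
    let counts :=
      (PySem.List.pyRange 0 ((sequence.length : Int) - 1) 1).foldl (pvBStep sequence last)
        PySem.Dict.empty
    if counts.items = [] then "self"
    else
      match PySem.List.max? counts.items (fun x => x.2) with
      | some p => p.1
      | none => "self"

-- ===== PRECONDITION & SPEC =====
def Spec_predict_next_archetype_py (sequence : List String) (out : String) : Prop := out = predict_next_archetype_py_alt sequence
instance (sequence : List String) (out : String) : Decidable (Spec_predict_next_archetype_py sequence out) := by unfold Spec_predict_next_archetype_py; infer_instance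

-- ===== CLAIM (what is proved, stated in full; the proofs are below) =====
def Claim_equal_predict_next_archetype_py : Prop := ∀ (sequence : List String), Dom_predict_next_archetype_py sequence → Spec_predict_next_archetype_py sequence (predict_next_archetype_py sequence)

-- ===== LEMMAS AND PROOFS =====

-- Invariant: the slot of `last` in A's transition table is exactly B's counts dict
-- (absent iff the counts dict is still empty).
theorem pv_inv (sequence : List String) (last : String) (l : List Int)
    (T : PySem.Dict String (PySem.Dict String Int)) (c : PySem.Dict String Int)
    (h : T.get? last = if c.items = [] then none else some c) :
    (l.foldl (pvAStep sequence) T).get? last =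
      (if (l.foldl (pvBStep sequence last) c).items = [] then none
       else some (l.foldl (pvBStep sequence last) c)) := by
  induction l generalizing T c with
  | nil => simpa using h
  | cons i rest ih =>
    simp only [List.foldl_cons]
    apply ih
    unfold pvAStep pvBStep
    by_cases hcur : PySem.List.pyGetD sequence i "" = last
    · simp only [hcur, if_pos trivial]
      by_cases hc : c.items = []
      · -- counts still empty: last not yet a key of T
        have hce : c = PySem.Dict.empty := by
          apply PySem.Dict.ext; simpa [PySem.Dict.empty] using hc
        have hget : T.get? last = none := by simpa [hc] using h
        have hcontains : T.contains last = false := by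
          rw [PySem.Dict.contains_eq_isSome_get?, hget]; rfl
        subst hce
        simp [hcontains, PySem.Dict.get?_insert_self, PySem.Dict.getD_insert_self,
          PySem.Dict.items_insert_of_not_contains, PySem.Dict.getD_empty]
      · -- counts nonempty: T.get? last = some c
        have hget : T.get? last = some c := by simpa [hc] using h
        have hcontains : T.contains last = true := by
          rw [PySem.Dict.contains_eq_isSome_get?, hget]; rfl
        have hgd : T.getD last PySem.Dict.empty = c :=
          PySem.Dict.getD_of_get?_eq_some _ _ hget
        have hne : (c.insert (PySem.List.pyGetD sequence (i + 1) "")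
            (c.getD (PySem.List.pyGetD sequence (i + 1) "") 0 + 1)).items ≠ [] := by
          rw [PySem.Dict.items_insert]
          split_ifs with hk
          · intro habs; exact hc (List.map_eq_nil_iff.mp habs)
          · simp
        simp [hcontains, hgd, PySem.Dict.get?_insert_self, if_neg hne]
    · -- current ≠ last: the slot of last is untouched on both sides
      have hne : last ≠ PySem.List.pyGetD sequence i "" := fun h' => hcur h'.symm
      simp only [if_neg hcur]
      by_cases hk : T.contains (PySem.List.pyGetD sequence i "")
      · simpa [hk, PySem.Dict.get?_insert_of_ne _ _ hne] using h
      · simpa [hk, PySem.Dict.get?_insert_of_ne _ _ hne] using h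

-- ===== VERDICT (by name: the statement is the Claim_ definition above) =====
theorem predict_next_archetype_py_spec : Claim_equal_predict_next_archetype_py := by
  intro sequence _
  unfold Spec_predict_next_archetype_py predict_next_archetype_py predict_next_archetype_py_alt
  by_cases hseq : sequence = []
  · simp [hseq]
  · simp only [if_neg hseq]
    set last := (PySem.List.pyGet? sequence (-1)).getD "" with hlast
    set l := PySem.List.pyRange 0 ((sequence.length : Int) - 1) 1 with hl
    have key := pv_inv sequence last l PySem.Dict.empty PySem.Dict.empty (by simp [PySem.Dict.empty, PySem.Dict.get?])
    set c := l.foldl (pvBStep sequence last) PySem.Dict.empty with hc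
    set T := l.foldl (pvAStep sequence) PySem.Dict.empty with hT

    by_cases hcont : c.items = []
    · have hn : T.get? last = none := by rw [key, if_pos hcont]
      have hf : T.contains last = false := by
        rw [PySem.Dict.contains_eq_isSome_get?, hn]; rfl
      simp [hf, hcont]
    · have hs : T.get? last = some c := by rw [key, if_neg hcont]
      have ht : T.contains last = true := by
        rw [PySem.Dict.contains_eq_isSome_get?, hs]; rfl
      have hgd := PySem.Dict.getD_of_get?_eq_some _ PySem.Dict.empty hs
      simp [ht, hgd, hcont]
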